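-- pv_equiv track=rewrite | github.com/JiwooL0920/leetcode | strings/easy/[338]counting-bits.py | jin
-- ===== SOURCE A (Python) =====
-- def jin(n):
--     """
--     :type n: int
--     :rtype: List[int]
--     """
--     # n=2
--     res = []
--     for i in range(n+1):
--         bin_num = bin(i)[2:]
--         counter = 0
--         for j in range(len(bin_num)):
--             if bin_num[j]=="1":
--                 counter+=1
--         res.append(counter)
--
--     return res
-- ===== SOURCE B (Python) =====
-- def jin(n):
--     res = []
--     for i in range(n + 1):
--         res.append(res[i >> 1] + (i & 1) if i else 0)
--     return res
-- ===== Notes on version B (the rewrite author's own statement) =====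
-- stated objective: faster
-- what changed: Replaces per-number binary-string construction plus an inner character-scanning loop with a single-pass DP using res[i] = res[i >> 1] + (i & 1).
import Mathlib
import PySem

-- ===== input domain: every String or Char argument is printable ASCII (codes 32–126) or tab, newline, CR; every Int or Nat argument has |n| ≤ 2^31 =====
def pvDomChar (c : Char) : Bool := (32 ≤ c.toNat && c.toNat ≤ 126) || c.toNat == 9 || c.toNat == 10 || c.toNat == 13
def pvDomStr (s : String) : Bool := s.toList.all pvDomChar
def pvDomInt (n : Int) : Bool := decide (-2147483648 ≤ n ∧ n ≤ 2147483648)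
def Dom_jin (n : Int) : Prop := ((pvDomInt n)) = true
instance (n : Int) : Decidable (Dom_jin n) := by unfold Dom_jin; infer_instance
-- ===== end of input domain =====

-- B replaces A's per-number binary-string build + char-scan with a one-pass DP
-- res[i] = res[i >> 1] + (i & 1); asymptotically faster, same values.

-- ===== PORT A =====
-- bin(i)[2:] for i ≥ 1: most-significant-first binary digits (exact for Nat inputs)
def pvBinCore (m : Nat) : List Char :=
  if h : m = 0 then []
  else pvBinCore (m / 2) ++ [if m % 2 = 1 then '1' else '0']
decreasing_by exact Nat.div_lt_self (Nat.pos_of_ne_zero h) (by norm_num)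

-- bin(i)[2:] for i ≥ 0 (bin(0)[2:] = "0")
def pvBinStr (i : Nat) : List Char := if i = 0 then ['0'] else pvBinCore i

def jin (n : Int) : List Int :=
  (PySem.List.pyRange 0 (n + 1) 1).foldl
    (fun res i =>
      let bin_num := pvBinStr i.toNat   -- i ∈ range(n+1) is nonneg, so toNat is exact
      let counter : Int :=
        (List.range bin_num.length).foldl
          (fun c j => if bin_num.getD j ' ' = '1' then c + 1 else c) 0
      res ++ [counter])
    []

-- ===== PORT B =====
def jin_alt (n : Int) : List Int :=
  (PySem.List.pyRange 0 (n + 1) 1).foldl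
    (fun res i =>
      -- for i ≥ 0 (guaranteed by range): i >> 1 = i / 2 and i & 1 = i % 2 exactly
      res ++ [if i = 0 then (0 : Int) else res.getD (i / 2).toNat 0 + i % 2])
    []

-- ===== PRECONDITION & SPEC =====
def Spec_jin (n : Int) (out : List Int) : Prop := out = jin_alt n
instance (n : Int) (out : List Int) : Decidable (Spec_jin n out) := by unfold Spec_jin; infer_instance

-- ===== CLAIM (what is proved, stated in full; the proofs are below) =====
def Claim_equal_jin : Prop := ∀ (n : Int), Dom_jin n → Spec_jin n (jin n)

-- ===== LEMMAS AND PROOFS =====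

-- popcount, the common value of both programs' entries
def pc (m : Nat) : Nat :=
  if h : m = 0 then 0 else pc (m / 2) + m % 2
decreasing_by exact Nat.div_lt_self (Nat.pos_of_ne_zero h) (by norm_num)

-- the reference list both folds build
def pvF (m : Nat) : List Int := (List.range m).map (fun k => (pc k : Int))

lemma count_fold (l : List Char) (c0 : Int) :
    (List.range l.length).foldl
      (fun c j => if l.getD j ' ' = '1' then c + 1 else c) c0
      = c0 + (l.count '1' : Int) := by
  induction l using List.reverseRecOn generalizing c0 with
  | nil => simp
  | append_singleton l' a ih =>
    rw [List.length_append, List.length_singleton, List.range_succ,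
        List.foldl_append]
    have hcong :
        (List.range l'.length).foldl
          (fun c j => if (l' ++ [a]).getD j ' ' = '1' then c + 1 else c) c0
        = (List.range l'.length).foldl
          (fun c j => if l'.getD j ' ' = '1' then c + 1 else c) c0 := by
      apply PySem.List.foldl_congr_mem
      intro c j hj
      have hj' : j < l'.length := List.mem_range.mp hj
      rw [List.getD_append _ _ _ _ hj']
    rw [hcong, ih]
    simp only [List.foldl_cons, List.foldl_nil,
      List.getD_append_right _ _ _ _ (le_refl l'.length), Nat.sub_self]
    by_cases h : a = '1' <;> simp [h, List.count_append] <;> ring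

lemma count_binCore (m : Nat) : (pvBinCore m).count '1' = pc m := by
  induction m using pvBinCore.induct with
  | case1 => rw [pvBinCore, pc]; simp
  | case2 m h ih =>
    rw [pvBinCore, pc]
    simp only [h]
    have h2 : m % 2 = 0 ∨ m % 2 = 1 := Nat.mod_two_eq_zero_or_one m
    rcases h2 with h2 | h2 <;> simp [h2, ih]

lemma count_binStr (m : Nat) : (pvBinStr m).count '1' = pc m := by
  unfold pvBinStr
  by_cases h : m = 0
  · simp [h, pc]
  · simp [h, count_binCore]

lemma jin_fold (m : Nat) :
    (PySem.List.pyRange 0 (m : Int) 1).foldl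
      (fun res i =>
        let bin_num := pvBinStr i.toNat
        let counter : Int :=
          (List.range bin_num.length).foldl
            (fun c j => if bin_num.getD j ' ' = '1' then c + 1 else c) 0
        res ++ [counter])
      [] = pvF m := by
  induction m with
  | zero => simp [PySem.List.pyRange_one_eq_nil, pvF]
  | succ m ih =>
    have hsplit : PySem.List.pyRange 0 ((m + 1 : Nat) : Int) 1
        = PySem.List.pyRange 0 (m : Int) 1 ++ [(m : Int)] := by
      push_cast
      exact PySem.List.pyRange_one_succ_right (by positivity)
    rw [hsplit, List.foldl_append, ih]
    simp only [List.foldl_cons, List.foldl_nil]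
    rw [Int.toNat_natCast, count_fold (pvBinStr m) 0]
    simp [pvF, List.range_succ, count_binStr]

lemma jin_alt_fold (m : Nat) :
    (PySem.List.pyRange 0 (m : Int) 1).foldl
      (fun res i =>
        res ++ [if i = 0 then (0 : Int) else res.getD (i / 2).toNat 0 + i % 2])
      [] = pvF m := by
  induction m with
  | zero => simp [PySem.List.pyRange_one_eq_nil, pvF]
  | succ m ih =>
    have hsplit : PySem.List.pyRange 0 ((m + 1 : Nat) : Int) 1
        = PySem.List.pyRange 0 (m : Int) 1 ++ [(m : Int)] := by
      push_cast
      exact PySem.List.pyRange_one_succ_right (by positivity)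
    rw [hsplit, List.foldl_append, ih]
    simp only [List.foldl_cons, List.foldl_nil]
    by_cases h : m = 0
    · subst h
      have h0 : pc 0 = 0 := by rw [pc]; simp
      simp [pvF, h0]
    · have hm : ((m : Int)) ≠ 0 := by exact_mod_cast h
      have hdiv : ((m : Int) / 2).toNat = m / 2 := by omega
      have hmod : ((m : Int)) % 2 = ((m % 2 : Nat) : Int) := by push_cast; ring
      have hget : (pvF m).getD (m / 2) 0 = ((pc (m / 2) : Nat) : Int) := by
        have hlt : m / 2 < m := Nat.div_lt_self (Nat.pos_of_ne_zero h) (by norm_num)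
        simp [pvF, List.getD_eq_getElem?_getD, hlt]
      rw [if_neg hm, hdiv, hget, hmod]
      have : (pc m : Int) = (pc (m / 2) : Int) + ((m % 2 : Nat) : Int) := by
        conv_lhs => rw [pc]
        rw [dif_neg h]; push_cast; ring
      simp [pvF, List.range_succ, this]

theorem jin_eq_alt (n : Int) : jin n = jin_alt n := by
  unfold jin jin_alt
  by_cases h : n + 1 ≤ 0
  · rw [PySem.List.pyRange_one_eq_nil h]; rfl
  · have h0 : (0 : Int) ≤ n + 1 := by omega
    have hcast : ((n + 1).toNat : Int) = n + 1 := Int.toNat_of_nonneg h0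
    rw [← hcast, jin_fold, jin_alt_fold]

-- ===== VERDICT (by name: the statement is the Claim_ definition above) =====
theorem jin_spec : Claim_equal_jin := by
  intro n _
  unfold Spec_jin
  exact jin_eq_alt n
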